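-- pv_equiv track=rewrite | github.com/i-redbyte/leetcode | easy/count asterisks/solution.py | countAsterisks2
-- ===== SOURCE A (Python) =====
-- def countAsterisks2(s: str) -> int:
--     result = 0
--     index = 0
--     for world in s.split("|"):
--         if index & 1 == 0:
--             result += len(world) - len(world.replace("*", ""))
--         index += 1
--     return result
-- ===== SOURCE B (Python) =====
-- def countAsterisks2(s: str) -> int:
--     outside = True
--     count = 0
--     for c in s:
--         if c == '|':
--             outside = not outside
--         elif outside and c == '*':
--             count += 1
--     return count
-- ===== Notes on version B (the rewrite author's own statement) =====
-- stated objective: simpler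
-- what changed: Replaced the split('|')/parity-index/replace-and-length-diff pipeline with a single character scan keeping an 'outside' flag toggled on '|' and a counter incremented on '*' while outside.
import Mathlib
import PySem

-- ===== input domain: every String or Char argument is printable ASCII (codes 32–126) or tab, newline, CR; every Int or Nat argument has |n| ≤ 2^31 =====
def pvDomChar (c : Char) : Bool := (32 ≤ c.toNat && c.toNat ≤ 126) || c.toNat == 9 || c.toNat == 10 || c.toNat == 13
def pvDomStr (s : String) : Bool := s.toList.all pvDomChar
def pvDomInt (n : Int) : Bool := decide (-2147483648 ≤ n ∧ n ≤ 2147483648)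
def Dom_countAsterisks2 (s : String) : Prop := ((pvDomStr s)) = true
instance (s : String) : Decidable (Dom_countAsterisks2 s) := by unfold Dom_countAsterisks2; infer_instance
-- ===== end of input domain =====

-- B replaces A's split/parity/replace pipeline with a single stateful scan over the characters (objective: simpler).

-- ===== PORT A =====
-- for world in s.split("|"): if index & 1 == 0: result += len(world) - len(world.replace("*",""))
def countAsterisks2 (s : String) : Int :=
  (((PySem.Str.split? s "|").getD []).foldl
    (fun (st : Int × Int) world =>
      ( if PySem.Int.band st.2 1 = 0 then
          st.1 + ((PySem.Str.len world : Int) - (PySem.Str.len (PySem.Str.replace world "*" "") : Int))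
        else st.1,
        st.2 + 1))
    (0, 0)).1

-- ===== PORT B =====
-- single scan: flip 'outside' on '|', count '*' while outside
def countAsterisks2_alt (s : String) : Int :=
  (s.toList.foldl
    (fun (st : Bool × Int) c =>
      if c = '|' then (!st.1, st.2)
      else if st.1 && c == '*' then (st.1, st.2 + 1)
      else st)
    (true, 0)).2

-- ===== PRECONDITION & SPEC =====
def Spec_countAsterisks2 (s : String) (out : Int) : Prop := out = countAsterisks2_alt s
instance (s : String) (out : Int) : Decidable (Spec_countAsterisks2 s out) := by unfold Spec_countAsterisks2; infer_instance

-- ===== CLAIM (what is proved, stated in full; the proofs are below) =====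
def Claim_equal_countAsterisks2 : Prop := ∀ (s : String), Dom_countAsterisks2 s → Spec_countAsterisks2 s (countAsterisks2 s)

-- ===== LEMMAS AND PROOFS =====

-- reference splitter for a single-character separator (proof-side model of s.split("|"))
def spB (b : Char) : List Char → List (List Char)
  | [] => [[]]
  | c :: cs =>
      if c = b then [] :: spB b cs
      else
        match spB b cs with
        | [] => [[c]]
        | h :: t => (c :: h) :: t

theorem spB_ne_nil (b : Char) (cs : List Char) : spB b cs ≠ [] := by
  cases cs with
  | nil => simp [spB]
  | cons c cs =>
      simp only [spB]
      split
      · simp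
      · split <;> simp

theorem modifyHead_nil_append (l : List (List Char)) :
    List.modifyHead (fun x => ([] : List Char) ++ x) l = l := by
  cases l <;> simp

theorem modifyHead_id_char (l : List (List Char)) :
    List.modifyHead (fun x : List Char => x) l = l := by
  cases l <;> simp

theorem spB_cons_sep (b : Char) (cs : List Char) : spB b (b :: cs) = [] :: spB b cs := by
  simp [spB]

theorem spB_cons_ne {b c : Char} (hc : c ≠ b) (cs : List Char) (h : List Char)
    (t : List (List Char)) (hsp : spB b cs = h :: t) :
    spB b (c :: cs) = (c :: h) :: t := by
  simp [spB, hc, hsp]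

theorem splitOn_go_eq (b : Char) :
    ∀ (fuel : Nat) (l cur : List Char) (acc : List (List Char)), l.length ≤ fuel →
      PySem.Chars.splitOn.go [b] fuel l cur acc =
        acc.reverse ++ (spB b l).modifyHead (cur.reverse ++ ·) := by
  intro fuel
  induction fuel with
  | zero =>
      intro l cur acc h
      have : l = [] := by cases l <;> simp_all
      subst this
      simp [PySem.Chars.splitOn.go, spB]
  | succ f ih =>
      intro l cur acc h
      cases l with
      | nil => simp [PySem.Chars.splitOn.go, spB]
      | cons c rest =>
          simp only [PySem.Chars.splitOn.go]
          simp only [List.length_cons] at h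
          by_cases hc : c = b
          · subst hc
            have hp : [c].isPrefixOf (c :: rest) = true := by simp [List.isPrefixOf]
            rw [if_pos hp]
            rw [show List.drop [c].length (c :: rest) = rest from rfl]
            rw [ih rest [] _ (Nat.le_of_succ_le_succ h)]
            rw [spB_cons_sep]
            simp [modifyHead_id_char]
          · have hp : [b].isPrefixOf (c :: rest) = false := by
              simp [List.isPrefixOf]
              exact fun hbc => absurd hbc.symm hc
            rw [if_neg (by simp [hp])]
            rw [ih rest (c :: cur) acc (Nat.le_of_succ_le_succ h)]
            cases hsp : spB b rest with
            | nil => exact absurd hsp (spB_ne_nil b rest)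
            | cons hh tt =>
                rw [spB_cons_ne hc rest hh tt hsp]
                simp

theorem splitOn_eq (b : Char) (cs : List Char) :
    PySem.Chars.splitOn cs [b] = spB b cs := by
  have := splitOn_go_eq b (cs.length + 1) cs [] [] (Nat.le_succ _)
  simpa [PySem.Chars.splitOn, modifyHead_id_char] using this

theorem replace_go_star (fuel : Nat) :
    ∀ (l acc : List Char), l.length ≤ fuel →
      PySem.Chars.replace.go ['*'] [] fuel l acc =
        acc.reverse ++ l.filter (fun c => c != '*') := by
  induction fuel with
  | zero =>
      intro l acc h
      have : l = [] := by cases l <;> simp_all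
      subst this
      simp [PySem.Chars.replace.go]
  | succ f ih =>
      intro l acc h
      cases l with
      | nil => simp [PySem.Chars.replace.go]
      | cons c rest =>
          simp only [PySem.Chars.replace.go]
          simp only [List.length_cons] at h
          by_cases hc : c = '*'
          · subst hc
            have hp : ['*'].isPrefixOf ('*' :: rest) = true := by simp [List.isPrefixOf]
            rw [if_pos hp]
            rw [show List.drop ['*'].length ('*' :: rest) = rest from rfl]
            rw [ih rest _ (Nat.le_of_succ_le_succ h)]
            simp
          · have hp : ['*'].isPrefixOf (c :: rest) = false := by
              simp [List.isPrefixOf]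
              exact fun hbc => absurd hbc.symm hc
            rw [if_neg (by simp [hp])]
            rw [ih rest _ (Nat.le_of_succ_le_succ h)]
            simp [hc]

theorem replace_star (w : List Char) :
    PySem.Chars.replace w ['*'] [] = w.filter (fun c => c != '*') := by
  simpa [PySem.Chars.replace] using replace_go_star w.length w [] (Nat.le_refl _)

theorem lenDiff_eq_countStar (w : List Char) :
    (w.length : Int) - ((w.filter (fun c => c != '*')).length : Int) =
      (w.countP (fun c => c == '*') : Int) := by
  have h1 : w.length = w.countP (fun c => c == '*') + w.countP (fun c => ¬((c == '*') = true)) :=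
    List.length_eq_countP_add_countP (fun c => c == '*')
  have h2 : (w.filter (fun c => c != '*')).length = w.countP (fun c => ¬((c == '*') = true)) := by
    rw [← List.countP_eq_length_filter]
    apply List.countP_congr
    intro c _
    simp
  omega

-- proof-side specification: count of asterisks outside bars, starting in state `out`
def gSpec (out : Bool) : List Char → Int
  | [] => 0
  | c :: cs =>
      if c = '|' then gSpec (!out) cs
      else (if out && c == '*' then 1 else 0) + gSpec out cs

theorem bandFlip (i : Int) : (PySem.Int.band (i + 1) 1 = 0) ↔ ¬ (PySem.Int.band i 1 = 0) := by
  rw [PySem.Int.band_one, PySem.Int.band_one,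
      PySem.Int.mod_eq_emod_of_pos (a := i) (by norm_num),
      PySem.Int.mod_eq_emod_of_pos (a := i + 1) (by norm_num)]
  omega

theorem B_foldl_eq (cs : List Char) :
    ∀ (out : Bool) (acc : Int),
      (cs.foldl
        (fun (st : Bool × Int) c =>
          if c = '|' then (!st.1, st.2)
          else if st.1 && c == '*' then (st.1, st.2 + 1)
          else st)
        (out, acc)).2 = acc + gSpec out cs := by
  induction cs with
  | nil => intro out acc; simp [gSpec]
  | cons c cs ih =>
      intro out acc
      rw [List.foldl_cons]
      by_cases hc : c = '|'
      · subst hc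
        rw [if_pos rfl, ih]
        simp [gSpec]
      · rw [if_neg hc]
        by_cases hs : (out && c == '*') = true
        · rw [if_pos hs, ih]
          simp only [gSpec, if_neg hc, if_pos hs]
          ring
        · rw [if_neg hs, ih]
          simp only [gSpec, if_neg hc, if_neg hs]
          ring

theorem A_foldl_eq (cs : List Char) :
    ∀ (pre : List Char) (res idx : Int),
      (((spB '|' cs).modifyHead (pre ++ ·)).foldl
        (fun (st : Int × Int) w =>
          ( if PySem.Int.band st.2 1 = 0 then st.1 + (w.countP (fun c => c == '*') : Int)
            else st.1,
            st.2 + 1))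
        (res, idx)).1 =
      res + (if PySem.Int.band idx 1 = 0 then (pre.countP (fun c => c == '*') : Int) else 0)
          + gSpec (decide (PySem.Int.band idx 1 = 0)) cs := by
  induction cs with
  | nil =>
      intro pre res idx
      simp only [spB, List.modifyHead, List.foldl_cons, List.foldl_nil, List.append_nil, gSpec]
      split_ifs <;> simp
  | cons c cs ih =>
      intro pre res idx
      by_cases hc : c = '|'
      · subst hc
        rw [spB_cons_sep]
        simp only [List.modifyHead, List.append_nil, List.foldl_cons]
        rw [← modifyHead_nil_append (spB '|' cs), ih []]
        have hflip := bandFlip idx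
        by_cases hb : PySem.Int.band idx 1 = 0
        · have hb' : ¬ (PySem.Int.band (idx + 1) 1 = 0) := by rw [hflip]; exact not_not_intro hb
          rw [if_pos hb, if_pos hb, if_neg hb']
          simp only [gSpec]
          rw [show decide (PySem.Int.band idx 1 = 0) = true from decide_eq_true hb,
              show decide (PySem.Int.band (idx + 1) 1 = 0) = false from decide_eq_false hb']
          simp
        · have hb' : PySem.Int.band (idx + 1) 1 = 0 := hflip.mpr hb
          rw [if_neg hb, if_neg hb, if_pos hb']
          simp only [gSpec]
          rw [show decide (PySem.Int.band idx 1 = 0) = false from decide_eq_false hb,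
              show decide (PySem.Int.band (idx + 1) 1 = 0) = true from decide_eq_true hb']
          simp
      · cases hsp : spB '|' cs with
        | nil => exact absurd hsp (spB_ne_nil '|' cs)
        | cons hh tt =>
            rw [spB_cons_ne hc cs hh tt hsp]
            simp only [List.modifyHead]
            rw [show pre ++ c :: hh = (pre ++ [c]) ++ hh from by simp]
            have hih := ih (pre ++ [c]) res idx
            rw [hsp] at hih
            simp only [List.modifyHead] at hih
            rw [hih]
            simp only [gSpec, if_neg hc, List.countP_append, List.countP_cons, List.countP_nil]
            by_cases hb : PySem.Int.band idx 1 = 0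
            · rw [show decide (PySem.Int.band idx 1 = 0) = true from decide_eq_true hb]
              by_cases hcs : (c == '*') = true
              · simp only [hcs, Bool.and_true, if_pos hb]
                push_cast
                ring
              · simp only [hcs, Bool.and_false, if_pos hb]
                simp
            · rw [show decide (PySem.Int.band idx 1 = 0) = false from decide_eq_false hb]
              simp [hb]

-- ===== VERDICT (by name: the statement is the Claim_ definition above) =====
theorem countAsterisks2_spec : Claim_equal_countAsterisks2 := by
  intro s _
  unfold Spec_countAsterisks2 countAsterisks2 countAsterisks2_alt
  have hsplit : PySem.Str.split? s "|" =
      some ((PySem.Chars.splitOn s.toList ['|']).map String.ofList) := by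
    simp [PySem.Str.split?, PySem.Chars.split?]
  rw [hsplit]
  simp only [Option.getD_some, List.foldl_map]
  have hbody :
      (fun (st : Int × Int) (w : List Char) =>
        ( if PySem.Int.band st.2 1 = 0 then
            st.1 + ((PySem.Str.len (String.ofList w) : Int)
                    - (PySem.Str.len (PySem.Str.replace (String.ofList w) "*" "") : Int))
          else st.1,
          st.2 + 1)) =
      (fun (st : Int × Int) (w : List Char) =>
        ( if PySem.Int.band st.2 1 = 0 then st.1 + (w.countP (fun c => c == '*') : Int)
          else st.1,
          st.2 + 1)) := by
    funext st w
    have hrep : (PySem.Str.replace (String.ofList w) "*" "").toList =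
        w.filter (fun c => c != '*') := by
      rw [PySem.Str.toList_replace]
      simpa using replace_star w
    have hlen2 : (PySem.Str.len (PySem.Str.replace (String.ofList w) "*" "") : Int) =
        ((w.filter (fun c => c != '*')).length : Int) := by
      simp [PySem.Str.len_eq, hrep]
    have hlen1 : (PySem.Str.len (String.ofList w) : Int) = (w.length : Int) := by
      simp [PySem.Str.len_eq]
    rw [hlen1, hlen2, lenDiff_eq_countStar]
  rw [hbody, splitOn_eq]
  rw [← modifyHead_nil_append (spB '|' s.toList), A_foldl_eq s.toList [] 0 0,
      B_foldl_eq s.toList true 0]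
  have hb0 : PySem.Int.band (0 : Int) 1 = 0 := by decide
  rw [if_pos hb0, show decide (PySem.Int.band (0 : Int) 1 = 0) = true from decide_eq_true hb0]
  simp
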